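-- pv_equiv track=rewrite | github.com/onurpoyraz/Bioinformatics-Projects | Genome Assembly/Contig Generator.py | contig_generator
-- ===== SOURCE A (Python) =====
-- def contig_generator(edges, founds):
--     output_series = ''
--     printed_series = ''
--     edges_remaining = []
--     for item in edges:
--         if not [element for element in founds if element in item[0]]:
--             output_series += '%s\n' % (item[0])
--         else:
--             edges_remaining.append(item)
--
--     current_element = ''
--     while (len(edges_remaining)>0):
--         for item in edges_remaining:
--             if (current_element == ''):
--                 if not [element for element in founds if element ==item[1]]:
--                     output_series += '%s' % (item[0])
--                     printed_series += '%s' % (item[0])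
--                     current_element = item[2]
--                     edges_remaining.remove(item)
--                     break;
--             else:
--                 if (item[1] == current_element):
--                     output_series += '%s' % (item[0][-1])
--                     printed_series += '%s' % (item[0][-1])
--                     current_element = item[2]
--                     if not [element for element in founds if element == current_element]:
--                         current_element = ''
--                         output_series += '\n'
--                         printed_series += '\n'
--                     edges_remaining.remove(item)
--                     break;
--     return output_series, printed_series
-- ===== SOURCE B (Python) =====
-- def contig_generator(edges, founds):
--     # One pass to partition the edges; a positional index (in-label -> stack of
--     # positions, first occurrence on top) and a stack of chain heads replace A's
--     # repeated rescans of a shrinking list; a founds set replaces A's repeated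
--     # list comprehensions over founds.
--     fset = set(founds)
--     free = []
--     rem = []
--     for it in edges:
--         if any(f in it[0] for f in founds):
--             rem.append(it)
--         else:
--             free.append(it[0] + '\n')
--     n = len(rem)
--     index = {}
--     heads = []
--     for i in range(n - 1, -1, -1):
--         e = rem[i]
--         index.setdefault(e[1], []).append(i)
--         if e[1] not in fset:
--             heads.append(i)
--     consumed = [False] * n
--     parts = []
--     cur = ''
--     remaining = n
--     while remaining:
--         if cur == '':
--             i = heads.pop()
--             while consumed[i]:
--                 i = heads.pop()
--             e = rem[i]
--             parts.append(e[0])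
--             cur = e[2]
--         else:
--             stack = index[cur]
--             i = stack.pop()
--             while consumed[i]:
--                 i = stack.pop()
--             e = rem[i]
--             parts.append(e[0][-1])
--             cur = e[2]
--             if cur not in fset:
--                 cur = ''
--                 parts.append('\n')
--         consumed[i] = True
--         remaining -= 1
--     printed = ''.join(parts)
--     return ''.join(free) + printed, printed
-- ===== Notes on version B (the rewrite author's own statement) =====
-- stated objective: faster
-- what changed: A repeatedly rescans and mutates the remaining-edges list and rescans founds with a list comprehension at every test; B partitions the edges once, builds a founds set, a positional index (in-label -> stack of positions) and a head stack, and runs the chain walk popping each next edge in amortized O(1).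
import Mathlib
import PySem

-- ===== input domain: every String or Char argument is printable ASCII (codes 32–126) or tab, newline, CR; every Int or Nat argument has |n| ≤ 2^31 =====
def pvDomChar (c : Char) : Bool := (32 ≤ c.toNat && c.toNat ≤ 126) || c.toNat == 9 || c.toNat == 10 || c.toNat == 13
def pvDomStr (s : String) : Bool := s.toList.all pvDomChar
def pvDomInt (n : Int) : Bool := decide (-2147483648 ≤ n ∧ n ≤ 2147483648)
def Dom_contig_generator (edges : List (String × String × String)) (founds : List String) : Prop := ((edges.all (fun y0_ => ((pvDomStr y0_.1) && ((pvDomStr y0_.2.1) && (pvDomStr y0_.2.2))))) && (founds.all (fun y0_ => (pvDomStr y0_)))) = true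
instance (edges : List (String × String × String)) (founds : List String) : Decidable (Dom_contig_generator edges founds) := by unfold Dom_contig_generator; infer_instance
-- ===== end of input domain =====

-- B replaces A's repeated rescans of a shrinking edge list (and of founds) by a one-pass
-- partition, a founds set, and positional stacks (in-label -> positions) so every chain
-- step pops its edge in amortized O(1) (objective: faster; same return value).

abbrev pvE := String × String × String

-- ===== PORT A =====
-- Transliteration of A.  The Python 'for item in edges_remaining: … remove(item); break'
-- is ported as "find the first matching edge and remove it there" (exactly what the scan
-- with break does; remove(item) removes the first equal element, which IS the scan
-- position, since the matching test depends only on the item's value).  When the scan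
-- finds no match on a non-empty list the Python while-loop spins forever; the port
-- returns the accumulators there (such inputs are outside Pre_contig_generator).
def pvScanA (founds : List String) (cur : String) : List pvE → Option (String × String × List pvE)
  | [] => none
  | item :: rest =>
    if cur == "" then
      if (founds.filter (fun element => element == item.2.1)) = [] then
        some (item.1, item.2.2, rest)
      else
        (pvScanA founds cur rest).map (fun r => (r.1, r.2.1, item :: r.2.2))
    else
      if item.2.1 == cur then
        let lc : String := match PySem.Str.pyGet? item.1 (-1) with
          | some ch => String.ofList [ch]      -- item[0][-1]
          | none => ""                      -- IndexError in Python; outside Pre_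
        if (founds.filter (fun element => element == item.2.2)) = [] then
          some (lc ++ "\n", "", rest)
        else
          some (lc, item.2.2, rest)
      else
        (pvScanA founds cur rest).map (fun r => (r.1, r.2.1, item :: r.2.2))

-- the while loop; the Nat fuel only makes the recursion structural: called with
-- fuel = |edges_remaining| it can never run out, because each pass removes one edge
def pvLoopA (founds : List String) : Nat → List pvE → String → String → String → String × String
  | 0, _R, _cur, out, printed => (out, printed)
  | Nat.succ n, R, cur, out, printed =>
    match pvScanA founds cur R with
    | none => (out, printed)
    | some r => pvLoopA founds n r.2.2 r.2.1 (out ++ r.1) (printed ++ r.1)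

def contig_generator (edges : List (String × String × String)) (founds : List String) : String × String :=
  let st := edges.foldl (fun (st : String × List pvE) item =>
      if (founds.filter (fun element => PySem.Str.isIn element item.1)) = [] then
        (st.1 ++ (item.1 ++ "\n"), st.2)
      else
        (st.1, st.2 ++ [item])) ("", [])
  pvLoopA founds st.2.length st.2 "" st.1 ""

-- ===== PORT B =====
-- last character of a, as Python's a[-1] ('' stands for the IndexError case, outside Pre_)
def pvLast (a : String) : String :=
  match PySem.Str.pyGet? a (-1) with
  | some ch => String.ofList [ch]
  | none => ""

-- Source B's 'i = s.pop(); while consumed[i]: i = s.pop()'.  A Python list used as a stack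
-- (append/pop at the right end) is modelled head-first: the Lean list's head is the
-- Python list's last element.  none = the pop of an empty list (IndexError, outside Pre_).
def pvPopLive (consumed : List Bool) : List Nat → Option (Nat × List Nat)
  | [] => none
  | i :: s => if consumed.getD i false then pvPopLive consumed s else some (i, s)

-- Source B's while loop; fuel = the Python variable 'remaining' (the loop runs exactly that
-- often).  The stray branches return the parts accumulated so far where Python raises
-- (IndexError/KeyError; all outside Pre_).
def pvLoopB (rem : List pvE) (fset : PySem.Set String) :
    Nat → List Nat → PySem.Dict String (List Nat) → List Bool → String → List String → List String
  | 0, _heads, _index, _consumed, _cur, parts => parts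
  | Nat.succ k, heads, index, consumed, cur, parts =>
    if cur = "" then
      match pvPopLive consumed heads with
      | none => parts
      | some (i, heads') =>
        let e := rem.getD i ("", "", "")
        pvLoopB rem fset k heads' index (consumed.set i true) e.2.2 (parts ++ [e.1])
    else
      match index.get? cur with
      | none => parts
      | some stack =>
        match pvPopLive consumed stack with
        | none => parts
        | some (i, stack') =>
          let e := rem.getD i ("", "", "")
          if PySem.Set.contains fset e.2.2 then
            pvLoopB rem fset k heads (index.insert cur stack') (consumed.set i true)
              e.2.2 (parts ++ [pvLast e.1])
          else
            pvLoopB rem fset k heads (index.insert cur stack') (consumed.set i true)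
              "" (parts ++ [pvLast e.1, "\n"])

def contig_generator_alt (edges : List (String × String × String)) (founds : List String) : String × String :=
  let fset := PySem.Set.ofList founds
  let st := edges.foldl (fun (st : List String × List pvE) item =>
      if founds.any (fun f => PySem.Str.isIn f item.1) then
        (st.1, st.2 ++ [item])
      else
        (st.1 ++ [item.1 ++ "\n"], st.2)) ([], [])
  let rem := st.2
  let n := rem.length
  -- Source B's 'for i in range(n-1,-1,-1): …' builds index and heads from the highest
  -- position down; that descending loop is the foldr over List.range n
  let bi := (List.range n).foldr (fun i (acc : PySem.Dict String (List Nat) × List Nat) =>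
      let e := rem.getD i ("", "", "")
      (acc.1.modify e.2.1 [] (fun s => i :: s),
       if PySem.Set.contains fset e.2.1 then acc.2 else i :: acc.2))
    (PySem.Dict.empty, [])
  let parts := pvLoopB rem fset n bi.2 bi.1 (List.replicate n false) "" []
  let printed := PySem.Str.join "" parts
  (PySem.Str.join "" st.1 ++ printed, printed)

-- ===== PRECONDITION & SPEC =====
-- the edges that survive A's first pass (some marker string occurs inside item[0])
def pvRemaining (edges : List pvE) (founds : List String) : List pvE :=
  edges.filter (fun item => founds.any (fun f => PySem.Str.isIn f item.1))

-- one step of the abstract machine A's while-loop implements: the first edge the scan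
-- accepts (head edge if cur = '', else in-label = cur), the list without it, the next cur
def pvStepDom (founds : List String) (R : List pvE) (cur : String) :
    Option (pvE × List pvE × String) :=
  if cur = "" then
    match R.findIdx? (fun e => !(founds.contains e.2.1)) with
    | none => none
    | some j => match R[j]? with
      | none => none
      | some e => some (e, R.eraseIdx j, e.2.2)
  else
    match R.findIdx? (fun e => e.2.1 == cur) with
    | none => none
    | some j => match R[j]? with
      | none => none
      | some e => some (e, R.eraseIdx j, if founds.contains e.2.2 then e.2.2 else "")

-- Pre_contig_generator holds exactly when A returns: its while-loop consumes every kept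
-- edge (each step finds a matching edge — otherwise A loops forever) and no chain step
-- reads item[0][-1] of an empty item[0] (there A raises IndexError); it excludes no input
-- on which A returns a value.
def pvChainCheckN (founds : List String) : Nat → List pvE → String → Bool
  | 0, R, _cur => R.isEmpty
  | Nat.succ n, R, cur =>
    match pvStepDom founds R cur with
    | none => R.isEmpty
    | some (e, R', cur') =>
      (decide (cur = "") || !(decide (e.1 = ""))) && pvChainCheckN founds n R' cur'

def pvChainCheck (founds : List String) (R : List pvE) (cur : String) : Bool :=
  pvChainCheckN founds R.length R cur

def Pre_contig_generator (edges : List (String × String × String)) (founds : List String) : Prop :=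
  pvChainCheck founds (pvRemaining edges founds) "" = true

instance (edges : List (String × String × String)) (founds : List String) : Decidable (Pre_contig_generator edges founds) := by unfold Pre_contig_generator; infer_instance

def pvWitness_contig_generator : (List (String × String × String)) × List String :=
  ([("xm", "a", "m"), ("ym", "m", "b")], ["m"])

def Spec_contig_generator (edges : List (String × String × String)) (founds : List String) (out : String × String) : Prop := out = contig_generator_alt edges founds
instance (edges : List (String × String × String)) (founds : List String) (out : String × String) : Decidable (Spec_contig_generator edges founds out) := by unfold Spec_contig_generator; infer_instance

-- ===== CLAIM (what is proved, stated in full; the proofs are below) =====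
def Claim_equal_contig_generator : Prop := ∀ (edges : List (String × String × String)) (founds : List String), Dom_contig_generator edges founds → Pre_contig_generator edges founds → Spec_contig_generator edges founds (contig_generator edges founds)

-- ===== LEMMAS AND PROOFS =====

-- each accepted step removes exactly one edge (termination measure of pvChainCheck)
theorem pvStepDom_some_length (founds : List String) (R : List pvE) (cur : String)
    (r : pvE × List pvE × String) (h : pvStepDom founds R cur = some r) :
    r.2.1.length + 1 = R.length := by
  unfold pvStepDom at h
  split at h <;>
  · split at h
    · cases h
    · next j _ =>
      split at h
      · cases h
      · next e he =>
        cases h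
        have hj : j < R.length := by
          have := List.getElem?_eq_some_iff.mp he
          exact this.1
        simp [List.length_eraseIdx, hj]
        omega


-- what A's accepted step appends to output_series/printed_series
def pvEmit (founds : List String) (cur : String) (e : pvE) : String :=
  if cur = "" then e.1
  else if founds.contains e.2.2 then pvLast e.1 else pvLast e.1 ++ "\n"

-- the same step's contribution as the list of parts Source B appends
def pvEmitL (founds : List String) (cur : String) (e : pvE) : List String :=
  if cur = "" then [e.1]
  else if founds.contains e.2.2 then [pvLast e.1] else [pvLast e.1, "\n"]

-- the parts of the whole run of the abstract machine
def pvRun (founds : List String) (R : List pvE) (cur : String) : List String :=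
  match h : pvStepDom founds R cur with
  | none => []
  | some (e, R', cur') => pvEmitL founds cur e ++ pvRun founds R' cur'
termination_by R.length
decreasing_by
  have := pvStepDom_some_length founds R cur _ h
  simp at this
  omega

theorem pvChainCheck_eq (founds : List String) (R : List pvE) (cur : String) :
    pvChainCheck founds R cur =
      match pvStepDom founds R cur with
      | none => R.isEmpty
      | some (e, R', cur') =>
        (decide (cur = "") || !(decide (e.1 = ""))) && pvChainCheck founds R' cur' := by
  unfold pvChainCheck
  cases hn : R.length with
  | zero =>
    have hR : R = [] := List.length_eq_zero_iff.mp hn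
    subst hR
    rw [show pvStepDom founds [] cur = none by
      unfold pvStepDom; by_cases hc : cur = "" <;> simp [hc]]
    rfl
  | succ n =>
    simp only [pvChainCheckN]
    cases hs : pvStepDom founds R cur with
    | none => rfl
    | some r =>
      obtain ⟨e, R', cur'⟩ := r
      have hl := pvStepDom_some_length founds R cur _ hs
      simp only at hl
      have hRn : R'.length = n := by omega
      have hred : ∀ (m : Nat),
          (match some (e, R', cur') with
            | none => R.isEmpty
            | some (e, R', cur') =>
              (decide (cur = "") || !(decide (e.1 = ""))) && pvChainCheckN founds m R' cur')
          = ((decide (cur = "") || !(decide (e.1 = ""))) && pvChainCheckN founds m R' cur') :=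
        fun _ => rfl
      rw [hred, hred, hRn]

theorem pvFilterBeqNil (founds : List String) (c : String) :
    (founds.filter (fun element => element == c) = []) ↔ c ∉ founds := by
  rw [List.filter_eq_nil_iff]
  constructor
  · intro h hc
    exact (h c hc) (by simp)
  · intro hc a ha
    simp only [beq_iff_eq]
    intro rfl_eq
    exact hc (rfl_eq ▸ ha)

theorem pvJoin_nil : PySem.Str.join "" ([] : List String) = "" := by
  apply String.ext
  simp [PySem.Str.toList_join, PySem.Chars.join_nil]

theorem pvJoin_cons (x : String) (l : List String) :
    PySem.Str.join "" (x :: l) = x ++ PySem.Str.join "" l := by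
  apply String.ext
  cases l with
  | nil =>
    simp [PySem.Str.toList_join, PySem.Chars.join_singleton, PySem.Chars.join_nil,
      String.toList_append]
  | cons y t =>
    simp [PySem.Str.toList_join, PySem.Chars.join_cons_cons, String.toList_append]

-- ---- A-side: the scan is the abstract step ----

theorem pvScanA_eq (founds : List String) (cur : String) (R : List pvE) :
    pvScanA founds cur R =
      (pvStepDom founds R cur).map (fun r => (pvEmit founds cur r.1, r.2.2, r.2.1)) := by
  induction R with
  | nil =>
    by_cases hcur : cur = "" <;> simp [pvScanA, pvStepDom, hcur]
  | cons item rest ih =>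
    by_cases hcur : cur = ""
    · subst hcur
      by_cases hb : item.2.1 ∈ founds
      · have hfil : ¬ (founds.filter (fun element => element == item.2.1) = []) := by
          rw [pvFilterBeqNil]; simp [hb]
        have hpred : (!(founds.contains item.2.1)) = false := by
          simp [hb]
        simp only [pvScanA, if_pos (by simp : ("" == "") = true), if_neg hfil, ih]
        simp only [pvStepDom, List.findIdx?_cons, hpred, Bool.false_eq_true, if_false]
        cases hf : rest.findIdx? (fun e => !(founds.contains e.2.1)) with
        | none => simp
        | some j =>
          cases hg : rest[j]? with
          | none => simp [hg]
          | some e => simp [hg]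
      · have hfil : (founds.filter (fun element => element == item.2.1) = []) := by
          rw [pvFilterBeqNil]; exact hb
        have hpred : (!(founds.contains item.2.1)) = true := by
          simp [hb]
        simp only [pvScanA, if_pos (by simp : ("" == "") = true), if_pos hfil]
        simp only [pvStepDom, List.findIdx?_cons, hpred, if_true]
        simp [pvEmit]
    · have hcurb : (cur == "") = false := by simp [hcur]
      by_cases hm : item.2.1 = cur
      · have hmb : (item.2.1 == cur) = true := by simp [hm]
        by_cases hout : item.2.2 ∈ founds
        · have hfil : ¬ (founds.filter (fun element => element == item.2.2) = []) := by
            rw [pvFilterBeqNil]; simp [hout]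
          have hcont : founds.contains item.2.2 = true := by
            simp [hout]
          simp only [pvScanA, hcurb, Bool.false_eq_true, if_false, hmb, if_true,
            if_neg hfil]
          simp only [pvStepDom, if_neg hcur, List.findIdx?_cons, hmb, if_true]
          simp [pvEmit, pvLast, hcur, hout]
        · have hfil : (founds.filter (fun element => element == item.2.2) = []) := by
            rw [pvFilterBeqNil]; exact hout
          have hcont : founds.contains item.2.2 = false := by
            simp [hout]
          simp only [pvScanA, hcurb, Bool.false_eq_true, if_false, hmb, if_true,
            if_pos hfil]
          simp only [pvStepDom, if_neg hcur, List.findIdx?_cons, hmb, if_true]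
          simp [pvEmit, pvLast, hcur, hout]
      · have hmb : (item.2.1 == cur) = false := by simp [hm]
        simp only [pvScanA, hcurb, Bool.false_eq_true, if_false, hmb, ih]
        simp only [pvStepDom, if_neg hcur, List.findIdx?_cons, hmb]
        cases hf : rest.findIdx? (fun e => e.2.1 == cur) with
        | none => simp
        | some j =>
          cases hg : rest[j]? with
          | none => simp [hg]
          | some e => simp [hg]

theorem pvLoopA_none (founds : List String) (R : List pvE) (cur out printed : String)
    (h : pvScanA founds cur R = none) :
    pvLoopA founds R.length R cur out printed = (out, printed) := by
  cases hn : R.length with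
  | zero => rfl
  | succ k => simp only [pvLoopA, h]

theorem pvLoopA_some (founds : List String) (n : Nat) (R : List pvE) (cur out printed : String)
    (r : String × String × List pvE) (h : pvScanA founds cur R = some r) :
    pvLoopA founds (Nat.succ n) R cur out printed =
      pvLoopA founds n r.2.2 r.2.1 (out ++ r.1) (printed ++ r.1) := by
  simp only [pvLoopA, h]

theorem pvLoopA_run (founds : List String) (R : List pvE) (cur out printed : String)
    (h : pvChainCheck founds R cur = true) :
    pvLoopA founds R.length R cur out printed =
      (out ++ PySem.Str.join "" (pvRun founds R cur),
       printed ++ PySem.Str.join "" (pvRun founds R cur)) := by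
  induction hn : R.length using Nat.strong_induction_on generalizing R cur out printed with
  | _ n ih =>
  rw [pvChainCheck_eq] at h
  rw [pvRun]
  cases hs : pvStepDom founds R cur with
  | none =>
    rw [hs] at h
    simp only [List.isEmpty_iff] at h
    subst h
    subst hn
    rw [pvLoopA_none founds [] cur out printed rfl]
    simp [pvJoin_nil, String.append_empty]
  | some r =>
    obtain ⟨e, R', cur'⟩ := r
    rw [hs] at h
    simp only [Bool.and_eq_true] at h
    have hlen := pvStepDom_some_length founds R cur _ hs
    simp only at hlen
    have hscan : pvScanA founds cur R = some (pvEmit founds cur e, cur', R') := by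
      rw [pvScanA_eq, hs]; rfl
    rw [← hn, ← hlen]
    rw [pvLoopA_some founds R'.length R cur out printed _ hscan]
    rw [ih R'.length (by omega) R' cur' _ _ h.2 rfl]
    have hjoin : PySem.Str.join "" (pvEmitL founds cur e ++ pvRun founds R' cur') =
        pvEmit founds cur e ++ PySem.Str.join "" (pvRun founds R' cur') := by
      by_cases hc : cur = ""
      · simp [pvEmitL, pvEmit, hc, pvJoin_cons]
      · by_cases ho : e.2.2 ∈ founds
        · simp [pvEmitL, pvEmit, hc, ho, pvJoin_cons]
        · simp [pvEmitL, pvEmit, hc, ho, pvJoin_cons, String.append_assoc]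
    rw [hjoin]
    simp [String.append_assoc]

-- ---- B-side: positions, liveness and stack invariants ----

def pvLive (consumed : List Bool) (i : Nat) : Bool := !(consumed.getD i false)

def pvLiveIdx (consumed : List Bool) (n : Nat) : List Nat :=
  (List.range n).filter (pvLive consumed)

def pvF (rem : List pvE) (i : Nat) : pvE := rem.getD i ("", "", "")

-- the stacks Source B maintains: an order-preserving remnant of all positions satisfying p,
-- still containing every live one
def pvStackInv (consumed : List Bool) (n : Nat) (p : Nat → Bool) (s : List Nat) : Prop :=
  s.Sublist ((List.range n).filter p) ∧
  ∀ i, i < n → p i = true → pvLive consumed i = true → i ∈ s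

theorem pvGetD_set_ne (l : List Bool) (i j : Nat) (a : Bool) (h : j ≠ i) :
    (l.set i a).getD j false = l.getD j false := by
  simp only [List.getD, List.getElem?_set]
  rw [if_neg (fun h' => h h'.symm)]

theorem pvPopLive_spec (consumed : List Bool) (n : Nat) (p : Nat → Bool) (s : List Nat)
    (hlen : consumed.length = n) (inv : pvStackInv consumed n p s) (i0 : Nat)
    (hi0 : i0 < n) (hp : p i0 = true) (hlive : pvLive consumed i0 = true)
    (hmin : ∀ j, j < n → p j = true → pvLive consumed j = true → i0 ≤ j) :
    ∃ rest, pvPopLive consumed s = some (i0, rest) ∧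
      pvStackInv (consumed.set i0 true) n p rest := by
  induction s with
  | nil => exact absurd (inv.2 i0 hi0 hp hlive) (List.not_mem_nil)
  | cons a s' ih =>
    have hsub' : s'.Sublist ((List.range n).filter p) := List.sublist_of_cons_sublist inv.1
    have hamem : a ∈ (List.range n).filter p := List.mem_of_cons_sublist inv.1
    have hpa : p a = true := (List.mem_filter.mp hamem).2
    have han : a < n := List.mem_range.mp (List.mem_filter.mp hamem).1
    by_cases hda : consumed.getD a false = true
    · have hlive_a : pvLive consumed a = false := by rw [pvLive, hda]; rfl
      have inv' : pvStackInv consumed n p s' := by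
        refine ⟨hsub', fun j hj hpj hlj => ?_⟩
        rcases List.mem_cons.mp (inv.2 j hj hpj hlj) with rfl | hmem
        · rw [hlive_a] at hlj; cases hlj
        · exact hmem
      obtain ⟨rest, hpop, hinv⟩ := ih inv'
      exact ⟨rest, by simp only [pvPopLive]; rw [if_pos hda]; exact hpop, hinv⟩
    · have hgd : consumed.getD a false = false := eq_false_of_ne_true hda
      have hlive_a : pvLive consumed a = true := by rw [pvLive, hgd]; rfl
      have hle : i0 ≤ a := hmin a han hpa hlive_a
      have hai0 : a = i0 := by
        rcases List.mem_cons.mp (inv.2 i0 hi0 hp hlive) with h0 | hmem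
        · exact h0.symm
        · exfalso
          have hpw : (a :: s').Pairwise (· < ·) :=
            List.Pairwise.sublist inv.1 (List.Pairwise.filter p List.pairwise_lt_range)
          have : a < i0 := (List.pairwise_cons.mp hpw).1 i0 hmem
          omega
      subst hai0
      refine ⟨s', by simp only [pvPopLive]; rw [if_neg (by rw [hgd]; simp)], hsub',
        fun j hj hpj hlj => ?_⟩
      have hja : j ≠ a := by
        intro hja; subst hja
        have hset : (consumed.set j true).getD j false = true := by
          simp [List.getD, (show j < consumed.length by omega)]
        rw [pvLive, hset] at hlj
        simp at hlj
      have hlj' : pvLive consumed j = true := by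
        rw [pvLive, pvGetD_set_ne consumed a j true hja] at hlj
        exact hlj
      rcases List.mem_cons.mp (inv.2 j hj hpj hlj') with rfl | hmem
      · exact absurd rfl hja
      · exact hmem

theorem pvStackInv_mono (consumed : List Bool) (n : Nat) (p : Nat → Bool) (s : List Nat)
    (hlen : consumed.length = n) (i0 : Nat) (hi0 : i0 < n)
    (inv : pvStackInv consumed n p s) : pvStackInv (consumed.set i0 true) n p s := by
  refine ⟨inv.1, fun j hj hpj hlj => ?_⟩
  have hji : j ≠ i0 := by
    intro hji; subst hji
    have hset : (consumed.set j true).getD j false = true := by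
      simp [List.getD, (show j < consumed.length by omega)]
    rw [pvLive, hset] at hlj
    simp at hlj
  rw [pvLive, pvGetD_set_ne consumed i0 j true hji] at hlj
  exact inv.2 j hj hpj hlj

theorem pvLive_set_eq (consumed : List Bool) (i0 : Nat) (hi0 : i0 < consumed.length)
    (k : Nat) : pvLive (consumed.set i0 true) k = (pvLive consumed k && !(k == i0)) := by
  by_cases hk : k = i0
  · subst hk
    have hset : (consumed.set k true).getD k false = true := by
      simp [List.getD, hi0]
    rw [pvLive, hset]
    simp
  · rw [pvLive, pvGetD_set_ne consumed i0 k true hk, ← pvLive]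
    simp [hk]

theorem pvFilter_ne_eraseIdx (L : List Nat) (hnd : L.Nodup) (j : Nat) (hj : j < L.length) :
    L.filter (fun k => !(k == L[j])) = L.eraseIdx j := by
  induction L generalizing j with
  | nil => simp at hj
  | cons a t ih =>
    rw [List.nodup_cons] at hnd
    cases j with
    | zero =>
      simp only [List.getElem_cons_zero, List.eraseIdx_cons_zero, List.filter_cons]
      rw [if_neg (by simp)]
      apply List.filter_eq_self.mpr
      intro x hx
      simp only [Bool.not_eq_eq_eq_not, Bool.not_true, beq_eq_false_iff_ne]
      intro hxa
      exact hnd.1 (hxa ▸ hx)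
    | succ m =>
      have hm : m < t.length := by simpa using hj
      have hat : a ≠ t[m] := by
        intro h
        exact hnd.1 (h ▸ t.getElem_mem hm)
      simp only [List.getElem_cons_succ, List.eraseIdx_cons_succ, List.filter_cons]
      rw [if_pos (by simp [hat])]
      rw [ih hnd.2 m hm]

theorem pvNodup_liveIdx (consumed : List Bool) (n : Nat) : (pvLiveIdx consumed n).Nodup :=
  List.Nodup.filter _ (List.nodup_range)

theorem pvLiveIdx_set (consumed : List Bool) (n i0 j : Nat) (hlen : consumed.length = n)
    (hj : j < (pvLiveIdx consumed n).length) (hij : (pvLiveIdx consumed n)[j] = i0) :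
    pvLiveIdx (consumed.set i0 true) n = (pvLiveIdx consumed n).eraseIdx j := by
  have hi0n : i0 < n := by
    have := (pvLiveIdx consumed n).getElem_mem hj
    rw [hij] at this
    exact List.mem_range.mp (List.mem_filter.mp this).1
  have h1 : pvLiveIdx (consumed.set i0 true) n =
      (pvLiveIdx consumed n).filter (fun k => !(k == i0)) := by
    unfold pvLiveIdx
    rw [List.filter_filter]
    apply List.filter_congr
    intro k _hk
    rw [pvLive_set_eq consumed i0 (by omega) k]
    rw [Bool.and_comm]
  rw [h1, ← hij]
  exact pvFilter_ne_eraseIdx _ (pvNodup_liveIdx consumed n) j hj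

theorem pvFindIdx_spec (rem : List pvE) (consumed : List Bool) (q : pvE → Bool) (j : Nat)
    (hj : ((pvLiveIdx consumed rem.length).map (pvF rem)).findIdx? q = some j) :
    j < (pvLiveIdx consumed rem.length).length ∧
    ((pvLiveIdx consumed rem.length).getD j 0 < rem.length ∧
     pvLive consumed ((pvLiveIdx consumed rem.length).getD j 0) = true ∧
     q (pvF rem ((pvLiveIdx consumed rem.length).getD j 0)) = true ∧
     ∀ i, i < rem.length → q (pvF rem i) = true → pvLive consumed i = true →
       (pvLiveIdx consumed rem.length).getD j 0 ≤ i) := by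
  set L := pvLiveIdx consumed rem.length with hL
  obtain ⟨hlt, hq, hmin⟩ := List.findIdx?_eq_some_iff_getElem.mp hj
  have hltL : j < L.length := by simpa using hlt
  have hgd : L.getD j 0 = L[j] := List.getD_eq_getElem L 0 hltL
  have hmemL : L[j] ∈ L := L.getElem_mem hltL
  have hmemL' : L[j] ∈ (List.range rem.length).filter (pvLive consumed) := hmemL
  have hfil := List.mem_filter.mp hmemL'
  refine ⟨hltL, ?_, ?_, ?_, ?_⟩
  · rw [hgd]; exact List.mem_range.mp hfil.1
  · rw [hgd]; exact hfil.2
  · rw [hgd]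
    have : (L.map (pvF rem))[j] = pvF rem L[j] := List.getElem_map _
    rw [← this]; exact hq
  · intro i hi hqi hlivei
    rw [hgd]
    have hiL : i ∈ L :=
      List.mem_filter.mpr ⟨List.mem_range.mpr hi, hlivei⟩
    obtain ⟨m, hm, hmi⟩ := List.mem_iff_getElem.mp hiL
    have hjm : j ≤ m := by
      by_contra hc
      push_neg at hc
      have := hmin m hc
      rw [List.getElem_map] at this
      rw [hmi] at this
      exact this hqi
    rcases Nat.eq_or_lt_of_le hjm with rfl | hlt'
    · omega
    · have hpw : L.Pairwise (· < ·) := List.Pairwise.filter _ List.pairwise_lt_range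
      have := List.pairwise_iff_getElem.mp hpw j m hltL hm hlt'
      omega

theorem pvLoopB_run (rem : List pvE) (founds : List String) (k : Nat) :
    ∀ (consumed : List Bool) (heads : List Nat) (index : PySem.Dict String (List Nat))
      (cur : String) (parts : List String),
    consumed.length = rem.length →
    k = (pvLiveIdx consumed rem.length).length →
    pvStackInv consumed rem.length (fun i => !(founds.contains (pvF rem i).2.1)) heads →
    (∀ label, pvStackInv consumed rem.length (fun i => (pvF rem i).2.1 == label)
        (index.getD label [])) →
    pvChainCheck founds ((pvLiveIdx consumed rem.length).map (pvF rem)) cur = true →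
    pvLoopB rem (PySem.Set.ofList founds) k heads index consumed cur parts
      = parts ++ pvRun founds ((pvLiveIdx consumed rem.length).map (pvF rem)) cur := by
  induction k with
  | zero =>
    intro consumed heads index cur parts hlen hk hh hidx hch
    have hL : pvLiveIdx consumed rem.length = [] := List.length_eq_zero_iff.mp hk.symm
    rw [hL]
    rw [pvRun]
    simp only [pvLoopB, List.map_nil]
    rw [show pvStepDom founds [] cur = none by
      unfold pvStepDom; by_cases hc : cur = "" <;> simp [hc]]
    simp
  | succ k ih =>
    intro consumed heads index cur parts hlen hk hh hidx hch
    rw [pvChainCheck_eq] at hch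
    cases hs : pvStepDom founds ((pvLiveIdx consumed rem.length).map (pvF rem)) cur with
    | none =>
      rw [hs] at hch
      simp only [List.isEmpty_iff, List.map_eq_nil_iff] at hch
      rw [hch] at hk
      simp at hk
    | some r =>
      obtain ⟨e, R', cur'⟩ := r
      rw [hs] at hch
      simp only [Bool.and_eq_true] at hch
      rw [pvRun, hs]
      by_cases hcur : cur = ""
      · -- head step
        subst hcur
        rw [pvStepDom, if_pos rfl] at hs
        cases hf : ((pvLiveIdx consumed rem.length).map (pvF rem)).findIdx?
            (fun e => !(founds.contains e.2.1)) with
        | none => rw [hf] at hs; cases hs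
        | some j =>
          obtain ⟨hltL, hi0n, hlive0, hq0, hmin0⟩ := pvFindIdx_spec rem consumed _ j hf
          have hgd : (pvLiveIdx consumed rem.length).getD j 0 =
              (pvLiveIdx consumed rem.length)[j] := List.getD_eq_getElem _ 0 hltL
          have hltR : j < ((pvLiveIdx consumed rem.length).map (pvF rem)).length := by
            simpa using hltL
          rw [hf] at hs
          simp only [List.getElem?_eq_getElem hltR, Option.some.injEq, Prod.mk.injEq] at hs
          obtain ⟨he1, he2, he3⟩ := hs
          have he : pvF rem ((pvLiveIdx consumed rem.length).getD j 0) = e := by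
            rw [← he1, hgd, List.getElem_map]
          have heD : rem.getD ((pvLiveIdx consumed rem.length).getD j 0) ("", "", "") = e := he
          have hc2 : e.2.2 = cur' := by rw [← he3, he1]
          obtain ⟨rest, hpop, hinv⟩ := pvPopLive_spec consumed rem.length
            (fun i => !(founds.contains (pvF rem i).2.1)) heads hlen hh _ hi0n (by exact hq0) hlive0
            (fun i hi hqi hli => by exact hmin0 i hi (by exact hqi) hli)
          simp only [pvLoopB, hpop, heD]
          have hsetIdx := pvLiveIdx_set consumed rem.length
            ((pvLiveIdx consumed rem.length).getD j 0) j hlen hltL hgd.symm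
          have hR' : (pvLiveIdx (consumed.set ((pvLiveIdx consumed rem.length).getD j 0) true)
              rem.length).map (pvF rem) = R' := by
            rw [hsetIdx, ← List.eraseIdx_map, he2]
          rw [ih (consumed.set ((pvLiveIdx consumed rem.length).getD j 0) true) rest index
            e.2.2 (parts ++ [e.1]) (by rw [List.length_set]; exact hlen)
            (by rw [hsetIdx, List.length_eraseIdx, if_pos hltL]; omega)
            hinv
            (fun label => pvStackInv_mono _ _ _ _ hlen _ hi0n (hidx label))
            (by rw [hR', hc2]; exact hch.2)]
          rw [hR', hc2]
          simp [pvEmitL, List.append_assoc]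
      · -- chain step
        rw [pvStepDom, if_neg hcur] at hs
        cases hf : ((pvLiveIdx consumed rem.length).map (pvF rem)).findIdx?
            (fun e => e.2.1 == cur) with
        | none => rw [hf] at hs; cases hs
        | some j =>
          obtain ⟨hltL, hi0n, hlive0, hq0, hmin0⟩ := pvFindIdx_spec rem consumed _ j hf
          have hgd : (pvLiveIdx consumed rem.length).getD j 0 =
              (pvLiveIdx consumed rem.length)[j] := List.getD_eq_getElem _ 0 hltL
          have hltR : j < ((pvLiveIdx consumed rem.length).map (pvF rem)).length := by
            simpa using hltL
          rw [hf] at hs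
          simp only [List.getElem?_eq_getElem hltR, Option.some.injEq, Prod.mk.injEq] at hs
          obtain ⟨he1, he2, he3⟩ := hs
          have he : pvF rem ((pvLiveIdx consumed rem.length).getD j 0) = e := by
            rw [← he1, hgd, List.getElem_map]
          have heD : rem.getD ((pvLiveIdx consumed rem.length).getD j 0) ("", "", "") = e := he
          have hc2 : (if founds.contains e.2.2 then e.2.2 else "") = cur' := by
            rw [← he3, he1]
          cases hg : index.get? cur with
          | none =>
            exfalso
            have hD : index.getD cur [] = [] := by
              unfold PySem.Dict.getD
              rw [hg]
              rfl
            have := (hidx cur).2 ((pvLiveIdx consumed rem.length).getD j 0) hi0n hq0 hlive0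
            rw [hD] at this
            exact List.not_mem_nil this
          | some stack =>
            have hD : index.getD cur [] = stack := by
              unfold PySem.Dict.getD
              rw [hg]
              rfl
            obtain ⟨rest, hpop, hinv⟩ := pvPopLive_spec consumed rem.length
              (fun i => (pvF rem i).2.1 == cur) stack hlen (hD ▸ hidx cur) _ hi0n (by exact hq0) hlive0
              (fun i hi hqi hli => by exact hmin0 i hi (by exact hqi) hli)
            simp only [pvLoopB, if_neg hcur, hg, hpop, heD]
            have hsetIdx := pvLiveIdx_set consumed rem.length
              ((pvLiveIdx consumed rem.length).getD j 0) j hlen hltL hgd.symm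
            have hR' : (pvLiveIdx (consumed.set ((pvLiveIdx consumed rem.length).getD j 0)
                true) rem.length).map (pvF rem) = R' := by
              rw [hsetIdx, ← List.eraseIdx_map, he2]
            have hlen' : (consumed.set ((pvLiveIdx consumed rem.length).getD j 0)
                true).length = rem.length := by rw [List.length_set]; exact hlen
            have hk' : k = (pvLiveIdx (consumed.set ((pvLiveIdx consumed rem.length).getD j 0)
                true) rem.length).length := by
              rw [hsetIdx, List.length_eraseIdx, if_pos hltL]; omega
            have hidx' : ∀ label, pvStackInv
                (consumed.set ((pvLiveIdx consumed rem.length).getD j 0) true) rem.length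
                (fun i => (pvF rem i).2.1 == label) ((index.insert cur rest).getD label []) := by
              intro label
              rw [PySem.Dict.getD_insert]
              by_cases hl : label = cur
              · subst hl
                rw [if_pos rfl]
                exact hinv
              · rw [if_neg hl]
                exact pvStackInv_mono _ _ _ _ hlen _ hi0n (hidx label)
            have hh' := pvStackInv_mono consumed rem.length
              (fun i => !(founds.contains (pvF rem i).2.1)) heads hlen _ hi0n hh
            by_cases hm : e.2.2 ∈ founds
            · have hcS : PySem.Set.contains (PySem.Set.ofList founds) e.2.2 = true :=
                (PySem.Set.contains_iff _ _).mpr ((PySem.Set.mem_ofList founds _).mpr hm)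
              have hcL : founds.contains e.2.2 = true := List.contains_iff_mem.mpr hm
              rw [hcL, if_pos rfl] at hc2
              rw [if_pos (by rw [hcS] : PySem.Set.contains (PySem.Set.ofList founds)
                e.2.2 = true)]
              rw [ih (consumed.set ((pvLiveIdx consumed rem.length).getD j 0) true) heads
                (index.insert cur rest) e.2.2 (parts ++ [pvLast e.1]) hlen' hk' hh' hidx'
                (by rw [hR', hc2]; exact hch.2)]
              rw [hR', hc2]
              simp only [pvEmitL, if_neg hcur, hcL]
              simp [List.append_assoc]
            · have hcS : PySem.Set.contains (PySem.Set.ofList founds) e.2.2 = false := by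
                rw [← Bool.not_eq_true, PySem.Set.contains_iff, PySem.Set.mem_ofList]
                exact hm
              have hcL : founds.contains e.2.2 = false := by
                rw [← Bool.not_eq_true, List.contains_iff_mem]; exact hm
              rw [hcL] at hc2
              simp only [Bool.false_eq_true, if_false] at hc2
              rw [if_neg (by rw [hcS]; simp)]
              rw [ih (consumed.set ((pvLiveIdx consumed rem.length).getD j 0) true) heads
                (index.insert cur rest) "" (parts ++ [pvLast e.1, "\n"]) hlen' hk' hh' hidx'
                (by rw [hR', hc2]; exact hch.2)]
              rw [hR', hc2]
              simp only [pvEmitL, if_neg hcur, hcL]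
              simp [List.append_assoc]

-- ---- first pass (both versions) and the initial stacks ----

theorem pvPassA_gen (founds : List String) (edges : List pvE) (s : String) (R : List pvE) :
    edges.foldl (fun (st : String × List pvE) item =>
      if (founds.filter (fun element => PySem.Str.isIn element item.1)) = [] then
        (st.1 ++ (item.1 ++ "\n"), st.2)
      else
        (st.1, st.2 ++ [item])) (s, R) =
    (s ++ PySem.Str.join "" ((edges.filter
        (fun it => !(founds.any (fun f => PySem.Str.isIn f it.1)))).map
        (fun it => it.1 ++ "\n")),
     R ++ pvRemaining edges founds) := by
  induction edges generalizing s R with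
  | nil => simp [pvRemaining, pvJoin_nil, String.append_empty]
  | cons item rest ih =>
    by_cases hfree : (founds.filter (fun element => PySem.Str.isIn element item.1)) = []
    · have hany : (founds.any (fun f => PySem.Str.isIn f item.1)) = false := by
        rw [List.any_eq_false]
        intro x hx
        rw [List.filter_eq_nil_iff] at hfree
        exact hfree x hx
      have hnp : ¬ ((founds.any (fun f => PySem.Str.isIn f item.1)) = true) := by
        rw [hany]; simp
      have hremc : pvRemaining (item :: rest) founds = pvRemaining rest founds := by
        unfold pvRemaining
        rw [List.filter_cons, if_neg hnp]
      have hfilc : (item :: rest).filter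
            (fun it => !(founds.any (fun f => PySem.Str.isIn f it.1))) =
          item :: rest.filter (fun it => !(founds.any (fun f => PySem.Str.isIn f it.1))) := by
        rw [List.filter_cons, if_pos (by rw [hany]; rfl)]
      simp only [List.foldl_cons, if_pos hfree]
      rw [ih, hremc, hfilc, List.map_cons, pvJoin_cons, String.append_assoc]
    · have hany : (founds.any (fun f => PySem.Str.isIn f item.1)) = true := by
        rcases List.ne_nil_iff_exists_cons.mp hfree with ⟨x, xs, hx⟩
        have hxm : x ∈ founds.filter (fun element => PySem.Str.isIn element item.1) := by
          rw [hx]; exact List.mem_cons_self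
        rw [List.mem_filter] at hxm
        exact List.any_eq_true.mpr ⟨x, hxm.1, hxm.2⟩
      have hremc : pvRemaining (item :: rest) founds = item :: pvRemaining rest founds := by
        unfold pvRemaining
        rw [List.filter_cons, if_pos hany]
      have hfilc : (item :: rest).filter
            (fun it => !(founds.any (fun f => PySem.Str.isIn f it.1))) =
          rest.filter (fun it => !(founds.any (fun f => PySem.Str.isIn f it.1))) := by
        rw [List.filter_cons, if_neg (by rw [hany]; simp)]
      simp only [List.foldl_cons, if_neg hfree]
      rw [ih, hremc, hfilc]
      simp [List.append_assoc]

theorem pvPassB_gen (founds : List String) (edges : List pvE) (l : List String) (R : List pvE) :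
    edges.foldl (fun (st : List String × List pvE) item =>
      if founds.any (fun f => PySem.Str.isIn f item.1) then
        (st.1, st.2 ++ [item])
      else
        (st.1 ++ [item.1 ++ "\n"], st.2)) (l, R) =
    (l ++ (edges.filter
        (fun it => !(founds.any (fun f => PySem.Str.isIn f it.1)))).map
        (fun it => it.1 ++ "\n"),
     R ++ pvRemaining edges founds) := by
  induction edges generalizing l R with
  | nil => simp [pvRemaining]
  | cons item rest ih =>
    by_cases hany : (founds.any (fun f => PySem.Str.isIn f item.1)) = true
    · have hremc : pvRemaining (item :: rest) founds = item :: pvRemaining rest founds := by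
        unfold pvRemaining
        rw [List.filter_cons, if_pos hany]
      have hfilc : (item :: rest).filter
            (fun it => !(founds.any (fun f => PySem.Str.isIn f it.1))) =
          rest.filter (fun it => !(founds.any (fun f => PySem.Str.isIn f it.1))) := by
        rw [List.filter_cons, if_neg (by rw [hany]; simp)]
      simp only [List.foldl_cons, if_pos hany]
      rw [ih, hremc, hfilc]
      simp [List.append_assoc]
    · have hany' : (founds.any (fun f => PySem.Str.isIn f item.1)) = false := by
        simpa using hany
      have hremc : pvRemaining (item :: rest) founds = pvRemaining rest founds := by
        unfold pvRemaining
        rw [List.filter_cons, if_neg hany]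
      have hfilc : (item :: rest).filter
            (fun it => !(founds.any (fun f => PySem.Str.isIn f it.1))) =
          item :: rest.filter (fun it => !(founds.any (fun f => PySem.Str.isIn f it.1))) := by
        rw [List.filter_cons, if_pos (by rw [hany']; rfl)]
      simp only [List.foldl_cons, hany', Bool.false_eq_true, if_false]
      rw [ih, hremc, hfilc, List.map_cons]
      simp [List.append_assoc]

theorem pvBuild_spec (rem : List pvE) (founds : List String) (is : List Nat)
    (d0 : PySem.Dict String (List Nat)) (h0 : List Nat) :
    (∀ label, (is.foldr (fun i (acc : PySem.Dict String (List Nat) × List Nat) =>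
        (acc.1.modify (pvF rem i).2.1 [] (fun s => i :: s),
         if PySem.Set.contains (PySem.Set.ofList founds) (pvF rem i).2.1 then acc.2
         else i :: acc.2)) (d0, h0)).1.getD label []
      = (is.filter (fun i => (pvF rem i).2.1 == label)) ++ d0.getD label []) ∧
    (is.foldr (fun i (acc : PySem.Dict String (List Nat) × List Nat) =>
        (acc.1.modify (pvF rem i).2.1 [] (fun s => i :: s),
         if PySem.Set.contains (PySem.Set.ofList founds) (pvF rem i).2.1 then acc.2
         else i :: acc.2)) (d0, h0)).2
      = (is.filter (fun i => !(founds.contains (pvF rem i).2.1))) ++ h0 := by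
  induction is with
  | nil => simp
  | cons i is ih =>
    simp only [List.foldr_cons]
    constructor
    · intro label
      rw [PySem.Dict.getD_modify]
      by_cases hl : label = (pvF rem i).2.1
      · subst hl
        rw [if_pos rfl, (ih).1, List.filter_cons, if_pos (by simp)]
        simp
      · rw [if_neg hl, (ih).1 label, List.filter_cons,
          if_neg (by simp; exact fun h => hl h.symm)]
    · by_cases hm : (pvF rem i).2.1 ∈ founds
      · have hc : PySem.Set.contains (PySem.Set.ofList founds) (pvF rem i).2.1 = true :=
          (PySem.Set.contains_iff _ _).mpr ((PySem.Set.mem_ofList founds _).mpr hm)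
        have hcl : founds.contains (pvF rem i).2.1 = true := List.contains_iff_mem.mpr hm
        simp only [hc, if_true]
        rw [List.filter_cons, if_neg (by rw [hcl]; simp)]
        exact (ih).2
      · have hc : PySem.Set.contains (PySem.Set.ofList founds) (pvF rem i).2.1 = false := by
          rw [← Bool.not_eq_true, PySem.Set.contains_iff, PySem.Set.mem_ofList]
          exact hm
        have hcl : founds.contains (pvF rem i).2.1 = false := by
          rw [← Bool.not_eq_true, List.contains_iff_mem]; exact hm
        simp only [hc, Bool.false_eq_true, if_false]
        rw [List.filter_cons, if_pos (by rw [hcl]; simp)]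
        rw [List.cons_append, (ih).2]

theorem pvF_def (l : List pvE) (i : Nat) : l.getD i ("", "", "") = pvF l i := rfl

theorem pvMapRange_pvF (l : List pvE) : (List.range l.length).map (pvF l) = l := by
  apply List.ext_getElem
  · simp
  · intro i h1 h2
    simp only [List.getElem_map, List.getElem_range, pvF, List.getD,
      List.getElem?_eq_getElem h2]
    rfl

theorem pvLiveIdx_replicate (n : Nat) : pvLiveIdx (List.replicate n false) n = List.range n := by
  unfold pvLiveIdx
  apply List.filter_eq_self.mpr
  intro i _
  rw [pvLive]
  rcases Nat.lt_or_ge i n with h | h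
  · rw [List.getD_replicate false h]
    rfl
  · rw [List.getD_eq_default _ _ (by simpa using h)]
    rfl

-- ===== VERDICT (by name: the statement is the Claim_ definition above) =====
theorem contig_generator_spec : Claim_equal_contig_generator := by
  intro edges founds _hdom hpre
  unfold Pre_contig_generator at hpre
  unfold Spec_contig_generator
  have hA : contig_generator edges founds =
      (PySem.Str.join "" ((edges.filter
          (fun it => !(founds.any (fun f => PySem.Str.isIn f it.1)))).map
          (fun it => it.1 ++ "\n")) ++
        PySem.Str.join "" (pvRun founds (pvRemaining edges founds) ""),
       PySem.Str.join "" (pvRun founds (pvRemaining edges founds) "")) := by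
    unfold contig_generator
    rw [pvPassA_gen founds edges "" []]
    simp only [List.nil_append]
    rw [pvLoopA_run founds (pvRemaining edges founds) "" _ "" hpre]
    rw [String.empty_append, String.empty_append]
  have hbuild := pvBuild_spec (pvRemaining edges founds) founds
    (List.range (pvRemaining edges founds).length) PySem.Dict.empty []
  have hh0 : pvStackInv (List.replicate (pvRemaining edges founds).length false)
      (pvRemaining edges founds).length
      (fun i => !(founds.contains (pvF (pvRemaining edges founds) i).2.1))
      ((List.range (pvRemaining edges founds).length).foldr
        (fun i (acc : PySem.Dict String (List Nat) × List Nat) =>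
          (acc.1.modify (pvF (pvRemaining edges founds) i).2.1 [] (fun s => i :: s),
           if PySem.Set.contains (PySem.Set.ofList founds)
               (pvF (pvRemaining edges founds) i).2.1 then acc.2
           else i :: acc.2)) (PySem.Dict.empty, [])).2 := by
    rw [hbuild.2, List.append_nil]
    refine ⟨List.Sublist.refl _, fun i hi hpi _hl => ?_⟩
    exact List.mem_filter.mpr ⟨List.mem_range.mpr hi, hpi⟩
  have hidx0 : ∀ label, pvStackInv (List.replicate (pvRemaining edges founds).length false)
      (pvRemaining edges founds).length
      (fun i => (pvF (pvRemaining edges founds) i).2.1 == label)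
      (((List.range (pvRemaining edges founds).length).foldr
        (fun i (acc : PySem.Dict String (List Nat) × List Nat) =>
          (acc.1.modify (pvF (pvRemaining edges founds) i).2.1 [] (fun s => i :: s),
           if PySem.Set.contains (PySem.Set.ofList founds)
               (pvF (pvRemaining edges founds) i).2.1 then acc.2
           else i :: acc.2)) (PySem.Dict.empty, [])).1.getD label []) := by
    intro label
    rw [hbuild.1 label,
      show (PySem.Dict.empty : PySem.Dict String (List Nat)).getD label [] = [] from rfl,
      List.append_nil]
    refine ⟨List.Sublist.refl _, fun i hi hpi _hl => ?_⟩
    exact List.mem_filter.mpr ⟨List.mem_range.mpr hi, hpi⟩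
  have hB : contig_generator_alt edges founds =
      (PySem.Str.join "" ((edges.filter
          (fun it => !(founds.any (fun f => PySem.Str.isIn f it.1)))).map
          (fun it => it.1 ++ "\n")) ++
        PySem.Str.join "" (pvRun founds (pvRemaining edges founds) ""),
       PySem.Str.join "" (pvRun founds (pvRemaining edges founds) "")) := by
    unfold contig_generator_alt
    rw [pvPassB_gen founds edges [] []]
    simp only [List.nil_append, pvF_def]
    have key := pvLoopB_run (pvRemaining edges founds) founds
      (pvRemaining edges founds).length
      (List.replicate (pvRemaining edges founds).length false) _ _ "" []
      (by rw [List.length_replicate])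
      (by rw [pvLiveIdx_replicate, List.length_range])
      hh0 hidx0
      (by rw [pvLiveIdx_replicate, pvMapRange_pvF]; exact hpre)
    rw [pvLiveIdx_replicate, pvMapRange_pvF, List.nil_append] at key
    exact congrArg (fun l => (PySem.Str.join "" ((edges.filter
      (fun it => !(founds.any (fun f => PySem.Str.isIn f it.1)))).map
      (fun it => it.1 ++ "\n")) ++ PySem.Str.join "" l, PySem.Str.join "" l)) key
  rw [hA, hB]
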